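-- pv_equiv track=rewrite | github.com/Adarsh5268/Blind-Bit | client/regex_engine.py | _extract_from_branch
-- ===== SOURCE A (Python) =====
-- def _split_alternation(pattern: str) -> list:
--     """Split pattern on top-level | (respecting parentheses)."""
--     depth = 0
--     parts = []
--     current = []
--     for ch in pattern:
--         if ch == '(':
--             depth += 1
--             current.append(ch)
--         elif ch == ')':
--             depth -= 1
--             current.append(ch)
--         elif ch == '|' and depth == 0:
--             parts.append(''.join(current))
--             current = []
--         else:
--             current.append(ch)
--     parts.append(''.join(current))
--     return [p for p in parts if p]
--
-- def _extract_from_branch(branch: str) -> list: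
--     """Extract literal fragments from a single branch of the pattern."""
--     fragments = []
--     i = 0
--     current_literal = []
--
--     while i < len(branch):
--         ch = branch[i]
--
--         if ch == '\\' and i + 1 < len(branch):
--             # Escape sequence
--             next_ch = branch[i + 1]
--             if next_ch in ('d', 'w', 's', 'D', 'W', 'S'):
--                 # Character class shorthand — breaks literal
--                 if current_literal:
--                     fragments.append({"text": ''.join(current_literal), "type": "ngram"})
--                     current_literal = []
--                 i += 2
--             else:
--                 # Escaped literal character
--                 current_literal.append(next_ch)
--                 i += 2
--
--         elif ch == '[':
--             # Character class — breaks literal but we can expand it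
--             if current_literal:
--                 fragments.append({"text": ''.join(current_literal), "type": "ngram"})
--                 current_literal = []
--             # Find closing ]
--             j = i + 1
--             if j < len(branch) and branch[j] == '^':
--                 j += 1
--             while j < len(branch) and branch[j] != ']':
--                 j += 1
--             i = j + 1
--
--         elif ch == '(':
--             # Group — recurse into subpattern
--             if current_literal:
--                 fragments.append({"text": ''.join(current_literal), "type": "ngram"})
--                 current_literal = []
--             # Find matching )
--             depth = 1
--             j = i + 1
--             while j < len(branch) and depth > 0:
--                 if branch[j] == '(':
--                     depth += 1
--                 elif branch[j] == ')':
--                     depth -= 1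
--                 j += 1
--             inner = branch[i + 1:j - 1]
--             # Process alternation inside group
--             for alt in _split_alternation(inner):
--                 sub_frags = _extract_from_branch(alt)
--                 fragments.extend(sub_frags)
--             i = j
--
--         elif ch in '.+*?{}':
--             # Metacharacter — breaks literal
--             if ch in '+*?' and current_literal:
--                 # The quantifier applies to last char — pop it
--                 last = current_literal.pop()
--                 if current_literal:
--                     fragments.append({"text": ''.join(current_literal), "type": "ngram"})
--                     current_literal = []
--             elif current_literal:
--                 fragments.append({"text": ''.join(current_literal), "type": "ngram"})
--                 current_literal = []
--             i += 1
--
--         else: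
--             # Regular literal character
--             current_literal.append(ch)
--             i += 1
--
--     if current_literal:
--         text = ''.join(current_literal)
--         fragments.append({"text": text, "type": "ngram"})
--
--     return fragments
-- ===== SOURCE B (Python) =====
-- def _split_alternation(pattern: str) -> list:
--     """Split pattern on top-level | (respecting parentheses)."""
--     depth = 0
--     parts = []
--     current = []
--     for ch in pattern:
--         if ch == '(':
--             depth += 1
--             current.append(ch)
--         elif ch == ')':
--             depth -= 1
--             current.append(ch)
--         elif ch == '|' and depth == 0:
--             parts.append(''.join(current))
--             current = []
--         else:
--             current.append(ch)
--     parts.append(''.join(current))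
--     return [p for p in parts if p]
--
-- def _tokenize(branch: str) -> list:
--     """One scan of the branch into tagged tokens (same index rules as the spec)."""
--     toks = []
--     i = 0
--     n = len(branch)
--     while i < n:
--         ch = branch[i]
--         if ch == '\\' and i + 1 < n:
--             nxt = branch[i + 1]
--             toks.append(('break',) if nxt in 'dwsDWS' else ('lit', nxt))
--             i += 2
--         elif ch == '[':
--             j = i + 1
--             if j < n and branch[j] == '^':
--                 j += 1
--             while j < n and branch[j] != ']':
--                 j += 1
--             toks.append(('break',))
--             i = j + 1
--         elif ch == '(':
--             depth = 1
--             j = i + 1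
--             while j < n and depth > 0:
--                 if branch[j] == '(':
--                     depth += 1
--                 elif branch[j] == ')':
--                     depth -= 1
--                 j += 1
--             toks.append(('group', branch[i + 1:j - 1]))
--             i = j
--         elif ch in '+*?':
--             toks.append(('quant',))
--             i += 1
--         elif ch in '.{}':
--             toks.append(('break',))
--             i += 1
--         else:
--             toks.append(('lit', ch))
--             i += 1
--     return toks
--
-- def _extract_from_branch(branch: str) -> list:
--     """Extract literal fragments from a single branch of the pattern."""
--     frags = []
--     buf = ''
--
--     def flush():
--         nonlocal buf
--         if buf:
--             frags.append({"text": buf, "type": "ngram"})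
--         buf = ''
--
--     for tok in _tokenize(branch):
--         kind = tok[0]
--         if kind == 'lit':
--             buf += tok[1]
--         elif kind == 'break':
--             flush()
--         elif kind == 'quant':
--             if buf:
--                 buf = buf[:-1]
--                 flush()
--         else:  # group
--             flush()
--             for alt in _split_alternation(tok[1]):
--                 frags.extend(_extract_from_branch(alt))
--     flush()
--     return frags
-- ===== Notes on version B (the rewrite author's own statement) =====
-- stated objective: alternative
-- what changed: A interleaves scanning and literal-buffer management in one while-loop; B first tokenizes the branch into a tagged token list (lit/break/quant/group) in one scan and then folds over the tokens with a literal buffer, recursing into group tokens.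
import Mathlib
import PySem

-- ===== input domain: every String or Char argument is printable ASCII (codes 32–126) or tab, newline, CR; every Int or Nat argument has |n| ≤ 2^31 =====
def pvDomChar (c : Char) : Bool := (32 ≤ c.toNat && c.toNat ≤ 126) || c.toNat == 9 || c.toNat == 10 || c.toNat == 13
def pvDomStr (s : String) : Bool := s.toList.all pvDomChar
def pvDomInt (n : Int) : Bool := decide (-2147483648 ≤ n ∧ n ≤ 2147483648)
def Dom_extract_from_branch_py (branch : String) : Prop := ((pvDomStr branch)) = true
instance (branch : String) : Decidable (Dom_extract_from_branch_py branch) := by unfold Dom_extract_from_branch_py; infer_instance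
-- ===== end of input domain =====

-- B restructures A's single interleaved while-loop into a tokenize pass followed by a fold
-- over the token list; same results, no speed claim.  (Both ports carry a Nat fuel argument,
-- len+1 at the top call, solely as a totality guard for the recursion into group contents.)

-- shared helpers (both Pythons contain the identical _split_alternation and index-scan code)

def pvFrag (cur : List Char) : List (String × String) :=
  [("text", String.mk cur), ("type", "ngram")]

def pvSplitAltStep (st : Int × List (List Char) × List Char) (ch : Char) :
    Int × List (List Char) × List Char :=
  let (depth, parts, current) := st
  if ch = '(' then (depth + 1, parts, current ++ [ch])
  else if ch = ')' then (depth - 1, parts, current ++ [ch])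
  else if ch = '|' ∧ depth = 0 then (depth, parts ++ [current], [])
  else (depth, parts, current ++ [ch])

-- _split_alternation
def pvSplitAlt (pattern : List Char) : List (List Char) :=
  let st := pattern.foldl pvSplitAltStep (0, [], [])
  (st.2.1 ++ [st.2.2]).filter (fun p => p ≠ [])

-- the '(' case's scan for the matching ')': (consumed chars incl. the closer, rest)
def pvGroupScan : List Char → Int → List Char × List Char
  | cs, depth =>
    if depth ≤ 0 then ([], cs)
    else match cs with
      | [] => ([], [])
      | c :: rest =>
        let d := if c = '(' then depth + 1 else if c = ')' then depth - 1 else depth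
        let r := pvGroupScan rest d
        (c :: r.1, r.2)

-- the '[' case's scan: optional '^', then up to and including ']'
def pvSkipClass (rest : List Char) : List Char :=
  let r1 := match rest with
    | '^' :: t => t
    | _ => rest
  (r1.dropWhile (fun c => c ≠ ']')).tail

-- ===== PORT A =====
-- A's while-loop over an index: one recursive function over the remaining suffix carrying
-- the fragments list and the current literal buffer (the loop state), interleaving the
-- scanning and the buffer handling exactly as the Python does.

def extract_from_branch_loop :
    Nat → List Char → List (List (String × String)) → List Char →
      List (List (String × String))
  | 0, _, frags, _ => frags
  | fuel + 1, cs, frags, cur =>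
    match cs with
    | [] => frags ++ (if cur ≠ [] then [pvFrag cur] else [])
    | ch :: rest =>
      if ch = '\\' ∧ rest ≠ [] then
        match rest with
        | next :: rest' =>
          if next ∈ ['d', 'w', 's', 'D', 'W', 'S'] then
            extract_from_branch_loop fuel rest'
              (frags ++ if cur ≠ [] then [pvFrag cur] else []) []
          else
            extract_from_branch_loop fuel rest' frags (cur ++ [next])
        | [] => frags
      else if ch = '[' then
        extract_from_branch_loop fuel (pvSkipClass rest)
          (frags ++ if cur ≠ [] then [pvFrag cur] else []) []
      else if ch = '(' then
        extract_from_branch_loop fuel (pvGroupScan rest 1).2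
          ((frags ++ if cur ≠ [] then [pvFrag cur] else []) ++
            (pvSplitAlt (pvGroupScan rest 1).1.dropLast).flatMap
              (fun alt => extract_from_branch_loop fuel alt [] []))
          []
      else if ch ∈ ['.', '+', '*', '?', '{', '}'] then
        if ch ∈ ['+', '*', '?'] ∧ cur ≠ [] then
          extract_from_branch_loop fuel rest
            (frags ++ if cur.dropLast ≠ [] then [pvFrag cur.dropLast] else []) []
        else if cur ≠ [] then
          extract_from_branch_loop fuel rest (frags ++ [pvFrag cur]) []
        else
          extract_from_branch_loop fuel rest frags cur
      else
        extract_from_branch_loop fuel rest frags (cur ++ [ch])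

def extract_from_branch_py (branch : String) : List (List (String × String)) :=
  extract_from_branch_loop (branch.toList.length + 1) branch.toList [] []

-- ===== PORT B =====
-- Source B: one scan of the branch into tagged tokens (_tokenize), then a fold over the token
-- list maintaining (fragments, buffer), recursing into group tokens via the alternatives.

inductive PvTok
  | lit : Char → PvTok
  | brk : PvTok
  | quant : PvTok
  | group : List Char → PvTok
deriving DecidableEq, Repr

def pvTokenizeF : Nat → List Char → List PvTok
  | 0, _ => []
  | _, [] => []
  | fuel + 1, ch :: rest =>
    if ch = '\\' ∧ rest ≠ [] then
      match rest with
      | nxt :: rest' =>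
        (if nxt ∈ ['d', 'w', 's', 'D', 'W', 'S'] then PvTok.brk else PvTok.lit nxt) ::
          pvTokenizeF fuel rest'
      | [] => []
    else if ch = '[' then
      PvTok.brk :: pvTokenizeF fuel (pvSkipClass rest)
    else if ch = '(' then
      PvTok.group (pvGroupScan rest 1).1.dropLast :: pvTokenizeF fuel (pvGroupScan rest 1).2
    else if ch ∈ ['+', '*', '?'] then
      PvTok.quant :: pvTokenizeF fuel rest
    else if ch ∈ ['.', '{', '}'] then
      PvTok.brk :: pvTokenizeF fuel rest
    else
      PvTok.lit ch :: pvTokenizeF fuel rest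

-- flush()
def pvFlush (buf : List Char) : List (List (String × String)) :=
  if buf ≠ [] then [pvFrag buf] else []

-- one step of the fold over the token list; recur = the recursive call on an alternative
def pvStepB (recur : List Char → List (List (String × String)))
    (st : List (List (String × String)) × List Char) (tok : PvTok) :
    List (List (String × String)) × List Char :=
  match tok with
  | .lit c => (st.1, st.2 ++ [c])
  | .brk => (st.1 ++ pvFlush st.2, [])
  | .quant => if st.2 ≠ [] then (st.1 ++ pvFlush st.2.dropLast, []) else st
  | .group inner => (st.1 ++ pvFlush st.2 ++ (pvSplitAlt inner).flatMap recur, [])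

def extract_from_branch_fold : Nat → List Char → List (List (String × String))
  | 0, _ => []
  | fuel + 1, branch =>
    let st := (pvTokenizeF (branch.length + 1) branch).foldl
      (pvStepB (extract_from_branch_fold fuel)) ([], [])
    st.1 ++ pvFlush st.2

def extract_from_branch_py_alt (branch : String) : List (List (String × String)) :=
  extract_from_branch_fold (branch.toList.length + 1) branch.toList

-- ===== PRECONDITION & SPEC =====
def Spec_extract_from_branch_py (branch : String) (out : List (List (String × String))) : Prop := out = extract_from_branch_py_alt branch
instance (branch : String) (out : List (List (String × String))) : Decidable (Spec_extract_from_branch_py branch out) := by unfold Spec_extract_from_branch_py; infer_instance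

-- ===== CLAIM (what is proved, stated in full; the proofs are below) =====
def Claim_equal_extract_from_branch_py : Prop := ∀ (branch : String), Dom_extract_from_branch_py branch → Spec_extract_from_branch_py branch (extract_from_branch_py branch)

-- ===== LEMMAS AND PROOFS =====

theorem pvGroupScan_append (cs : List Char) (d : Int) :
    (pvGroupScan cs d).1 ++ (pvGroupScan cs d).2 = cs ∨ (pvGroupScan cs d).2 = [] := by
  induction cs generalizing d with
  | nil => rw [pvGroupScan]; split <;> simp
  | cons c rest ih =>
    rw [pvGroupScan]
    split
    · simp
    · rcases ih (if c = '(' then d + 1 else if c = ')' then d - 1 else d) with h | h <;>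
        simp [h]

theorem pvGroupScan_len (cs : List Char) (d : Int) :
    (pvGroupScan cs d).1.length + (pvGroupScan cs d).2.length ≤ cs.length := by
  rcases pvGroupScan_append cs d with h | h
  · have := congrArg List.length h
    simp at this; omega
  · have : (pvGroupScan cs d).1.length ≤ cs.length := by
      clear h
      induction cs generalizing d with
      | nil => rw [pvGroupScan]; split <;> simp
      | cons c rest ih =>
        rw [pvGroupScan]
        split
        · simp
        · simpa using Nat.add_le_add_right
            (ih (if c = '(' then d + 1 else if c = ')' then d - 1 else d)) 1
    simp [h]; omega

theorem pvSkipClass_len (rest : List Char) : (pvSkipClass rest).length ≤ rest.length := by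
  unfold pvSkipClass
  have h1 : ∀ (l : List Char), (l.dropWhile (fun c => c ≠ ']')).tail.length ≤ l.length := by
    intro l
    have h2 := List.length_dropWhile_le (p := fun c : Char => c ≠ ']') (l := l)
    have h3 : (l.dropWhile (fun c => c ≠ ']')).tail.length
        = (l.dropWhile (fun c => c ≠ ']')).length - 1 := List.length_tail
    omega
  split
  · next t => have := h1 t; simp at this ⊢; omega
  · exact h1 rest

theorem pvSplitAlt_foldl_len (xs : List Char) (d : Int) (ps : List (List Char))
    (cur : List Char) (p : List Char)
    (hp : p ∈ (xs.foldl pvSplitAltStep (d, ps, cur)).2.1 ++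
      [(xs.foldl pvSplitAltStep (d, ps, cur)).2.2]) :
    p ∈ ps ∨ p.length ≤ cur.length + xs.length := by
  induction xs generalizing d ps cur with
  | nil =>
    simp at hp
    rcases hp with h | h
    · exact Or.inl h
    · subst h; right; omega
  | cons x xs ih =>
    simp only [List.foldl_cons] at hp
    unfold pvSplitAltStep at hp
    simp only at hp
    split at hp
    · rcases ih _ _ _ hp with h | h
      · exact Or.inl h
      · right; simp at h ⊢; omega
    · split at hp
      · rcases ih _ _ _ hp with h | h
        · exact Or.inl h
        · right; simp at h ⊢; omega
      · split at hp
        · rcases ih _ _ _ hp with h | h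
          · simp at h
            rcases h with h | h
            · exact Or.inl h
            · subst h; right; simp; try omega
          · right; simp at h ⊢; omega
        · rcases ih _ _ _ hp with h | h
          · exact Or.inl h
          · right; simp at h ⊢; omega

theorem pvSplitAlt_len (x : List Char) (p : List Char) (hp : p ∈ pvSplitAlt x) :
    p.length ≤ x.length := by
  unfold pvSplitAlt at hp
  simp only [List.mem_filter] at hp
  rcases pvSplitAlt_foldl_len x 0 [] [] p hp.1 with h | h
  · simp at h
  · simpa using h

theorem pvSplitAlt_ne (x : List Char) (p : List Char) (hp : p ∈ pvSplitAlt x) :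
    p ≠ [] := by
  unfold pvSplitAlt at hp
  simp only [List.mem_filter, decide_eq_true_eq] at hp
  exact hp.2

theorem pv_flatMap_congr {α β : Type} {l : List α} {f g : α → List β}
    (h : ∀ a ∈ l, f a = g a) : l.flatMap f = l.flatMap g := by
  induction l with
  | nil => simp
  | cons x xs ih =>
    simp only [List.flatMap_cons, h x (by simp), ih fun a ha => h a (by simp [ha])]

theorem loop_eq_fold : ∀ (n : Nat) (cs : List Char), cs.length ≤ n →
    ∀ (fA fT g : Nat) (frags : List (List (String × String))) (cur : List Char),
      cs.length < fA → cs.length < fT → cs.length ≤ g + 1 →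
      extract_from_branch_loop fA cs frags cur
        = ((pvTokenizeF fT cs).foldl
            (pvStepB (extract_from_branch_fold g)) (frags, cur)).1
          ++ pvFlush ((pvTokenizeF fT cs).foldl
            (pvStepB (extract_from_branch_fold g)) (frags, cur)).2 := by
  intro n
  induction n with
  | zero =>
    intro cs hn fA fT g frags cur hfA hfT hg
    have hcs : cs = [] := by
      cases cs with
      | nil => rfl
      | cons a b => simp at hn
    subst hcs
    obtain ⟨fA', rfl⟩ : ∃ k, fA = k + 1 := ⟨fA - 1, by omega⟩
    obtain ⟨fT', rfl⟩ : ∃ k, fT = k + 1 := ⟨fT - 1, by omega⟩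
    simp [extract_from_branch_loop, pvTokenizeF, pvFlush]
  | succ n ih =>
    intro cs hn fA fT g frags cur hfA hfT hg
    obtain ⟨fA', rfl⟩ : ∃ k, fA = k + 1 := ⟨fA - 1, by omega⟩
    obtain ⟨fT', rfl⟩ : ∃ k, fT = k + 1 := ⟨fT - 1, by omega⟩
    cases cs with
    | nil => simp [extract_from_branch_loop, pvTokenizeF, pvFlush]
    | cons ch rest =>
      simp only [List.length_cons] at hn hfA hfT hg
      by_cases h1 : ch = '\\' ∧ rest ≠ []
      · obtain ⟨rfl, hne⟩ := h1
        rcases rest with _ | ⟨next, rest'⟩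
        · simp at hne
        · simp only [List.length_cons] at hn hfA hfT hg
          by_cases hm : next ∈ ['d', 'w', 's', 'D', 'W', 'S']
          · simp only [extract_from_branch_loop, pvTokenizeF, hm, List.cons_ne_self,
              ne_eq, reduceCtorEq, not_false_eq_true, and_self, if_true, if_pos,
              List.foldl_cons, pvStepB]
            rw [ih rest' (by omega) fA' fT' g _ [] (by omega) (by omega) (by omega)]
            simp [pvStepB, pvFlush]
          · simp only [extract_from_branch_loop, pvTokenizeF, hm, List.cons_ne_self,
              ne_eq, reduceCtorEq, not_false_eq_true, and_self, if_true, if_neg,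
              if_false, List.foldl_cons, pvStepB]
            rw [ih rest' (by omega) fA' fT' g frags (cur ++ [next])
              (by omega) (by omega) (by omega)]
      · by_cases h2 : ch = '['
        · subst h2
          have hsk := pvSkipClass_len rest
          simp only [extract_from_branch_loop, pvTokenizeF, h1, if_neg, if_pos,
            Char.reduceEq, if_false, if_true, List.foldl_cons, pvStepB]
          rw [ih (pvSkipClass rest) (by omega) fA' fT' g _ []
            (by omega) (by omega) (by omega)]
          simp [pvStepB, pvFlush]
        · by_cases h3 : ch = '('
          · subst h3
            have hgs := pvGroupScan_len rest 1
            have halts : ∀ alt ∈ pvSplitAlt (pvGroupScan rest 1).1.dropLast,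
                extract_from_branch_loop fA' alt [] []
                  = extract_from_branch_fold g alt := by
              intro alt halt
              have hl := pvSplitAlt_len _ _ halt
              have hne := pvSplitAlt_ne _ _ halt
              have hlp : 1 ≤ alt.length := by
                cases alt with
                | nil => simp at hne
                | cons a b => simp
              rw [List.length_dropLast] at hl
              obtain ⟨g', hg'⟩ : ∃ k, g = k + 1 := ⟨g - 1, by omega⟩
              rw [hg']
              rw [ih alt (by omega) fA' (alt.length + 1) g' [] []
                (by omega) (by omega) (by omega)]
              simp only [extract_from_branch_fold]
            simp only [extract_from_branch_loop, pvTokenizeF, h1, if_neg, if_pos,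
              Char.reduceEq, if_false, if_true, List.foldl_cons, pvStepB]
            rw [pv_flatMap_congr halts]
            rw [ih (pvGroupScan rest 1).2 (by omega) fA' fT' g _ []
              (by omega) (by omega) (by omega)]
            simp [pvStepB, pvFlush]
          · by_cases h4q : ch ∈ ['+', '*', '?']
            · have h4 : ch ∈ ['.', '+', '*', '?', '{', '}'] := by
                simp at h4q ⊢; tauto
              by_cases hcur : cur ≠ []
              · simp only [extract_from_branch_loop, pvTokenizeF, h1, h2, h3, h4,
                  h4q, hcur, and_self, if_neg, if_pos, if_false, if_true,
                  List.foldl_cons, pvStepB]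
                rw [ih rest (by omega) fA' fT' g _ [] (by omega) (by omega) (by omega)]
                simp [pvStepB, pvFlush, hcur]
              · simp only [not_not] at hcur
                subst hcur
                simp only [extract_from_branch_loop, pvTokenizeF, h1, h2, h3, h4,
                  h4q, and_false, if_neg, if_pos, if_false, if_true, ne_eq,
                  not_true_eq_false, List.foldl_cons, pvStepB]
                rw [ih rest (by omega) fA' fT' g frags [] (by omega) (by omega) (by omega)]
            · by_cases h4b : ch ∈ ['.', '{', '}']
              · have h4 : ch ∈ ['.', '+', '*', '?', '{', '}'] := by
                  simp at h4b ⊢; tauto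
                have h5 : ¬(ch ∈ ['+', '*', '?'] ∧ cur ≠ []) := fun hc => h4q hc.1
                by_cases hcur : cur ≠ []
                · simp only [extract_from_branch_loop, pvTokenizeF, h1, h2, h3, h4,
                    h4q, h4b, h5, hcur, if_neg, if_pos, if_false, if_true,
                    List.foldl_cons, pvStepB]
                  rw [ih rest (by omega) fA' fT' g (frags ++ [pvFrag cur]) []
                    (by omega) (by omega) (by omega)]
                  simp [pvStepB, pvFlush, hcur]
                · simp only [not_not] at hcur
                  subst hcur
                  simp only [extract_from_branch_loop, pvTokenizeF, h1, h2, h3, h4,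
                    h4q, h4b, h5, if_neg, if_pos, if_false, if_true, ne_eq,
                    not_true_eq_false, List.foldl_cons, pvStepB]
                  rw [ih rest (by omega) fA' fT' g frags [] (by omega) (by omega) (by omega)]
                  simp [pvStepB, pvFlush]
              · have h4 : ch ∉ ['.', '+', '*', '?', '{', '}'] := by
                  simp at h4q h4b ⊢; tauto
                simp only [extract_from_branch_loop, pvTokenizeF, h1, h2, h3, h4,
                  h4q, h4b, if_neg, if_false, List.foldl_cons, pvStepB]
                rw [ih rest (by omega) fA' fT' g frags (cur ++ [ch])
                  (by omega) (by omega) (by omega)]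

-- ===== VERDICT (by name: the statement is the Claim_ definition above) =====
theorem extract_from_branch_py_spec : Claim_equal_extract_from_branch_py := by
  intro branch _
  unfold Spec_extract_from_branch_py extract_from_branch_py extract_from_branch_py_alt
  rw [loop_eq_fold branch.toList.length branch.toList (le_refl _)
    (branch.toList.length + 1) (branch.toList.length + 1) branch.toList.length [] []
    (by omega) (by omega) (by omega)]
  simp only [extract_from_branch_fold]
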